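-- pv_equiv track=rewrite | github.com/joegrimer/joegrimer.github.io | calculation_solitaire/calc2.py | precedes
-- ===== SOURCE A (Python) =====
-- def precedes(card_A, card_B): # only 13*12=166 combos
--     matches = 0
--     card_B %= 13
--     for column in range(1,5):
--         card_C = card_A%13
--         while card_C!=0:
--             card_C=(card_C+column)%13
--             if card_C==card_B:
--                 matches+=1
--                 break
--     return matches
-- ===== SOURCE B (Python) =====
-- _INV = {1: 1, 2: 7, 3: 9, 4: 10}  # modular inverses of the step sizes mod 13 (13 is prime)
--
-- def precedes(card_A, card_B):
--     a = card_A % 13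
--     b = card_B % 13
--     if a == 0:
--         return 0
--     count = 0
--     for step, inv in _INV.items():
--         k_b = ((b - a) * inv) % 13 or 13   # steps to reach b (0 steps means a full cycle of 13)
--         k_0 = ((-a) * inv) % 13            # steps to reach 0 (a != 0, so 1..12)
--         if k_b <= k_0:
--             count += 1
--     return count
-- ===== Notes on version B (the rewrite author's own statement) =====
-- stated objective: simpler
-- what changed: Replaces the four forward-stepping while-loop walks around the 13-cycle with a closed-form comparison per step size: using the modular inverse of the step mod 13, compute the number of steps to reach card_B and to reach 0 and count the columns where the former is not larger.
import Mathlib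
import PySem

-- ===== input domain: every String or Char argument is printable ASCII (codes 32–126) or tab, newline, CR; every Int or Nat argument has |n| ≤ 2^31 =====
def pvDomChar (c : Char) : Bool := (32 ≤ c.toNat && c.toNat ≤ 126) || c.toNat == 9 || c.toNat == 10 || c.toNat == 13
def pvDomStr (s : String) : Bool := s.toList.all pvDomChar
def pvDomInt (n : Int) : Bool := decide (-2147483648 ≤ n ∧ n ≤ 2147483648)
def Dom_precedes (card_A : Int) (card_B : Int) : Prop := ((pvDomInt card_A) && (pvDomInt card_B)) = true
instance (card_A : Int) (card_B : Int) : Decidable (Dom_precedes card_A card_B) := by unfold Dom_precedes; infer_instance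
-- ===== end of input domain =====

-- B replaces A's step-by-step cycle walk with a closed-form count using modular inverses (objective: simpler).

-- ===== PORT A =====
-- the inner 'while card_C != 0' loop; the step is coprime to 13, so the walk
-- reaches 0 (or breaks at card_B) within 13 iterations — fuel 13 is never exhausted
def precedesWhile (fuel : Nat) (column : Int) (card_B : Int) (card_C : Int) (m : Int) : Int :=
  match fuel with
  | 0 => m
  | f + 1 =>
    if card_C ≠ 0 then
      let card_C' := PySem.Int.mod (card_C + column) 13
      if card_C' = card_B then m + 1
      else precedesWhile f column card_B card_C' m
    else m

def precedes (card_A : Int) (card_B : Int) : Int :=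
  let card_B' := PySem.Int.mod card_B 13
  (PySem.List.pyRange 1 5 1).foldl
    (fun m column =>
      let card_C := PySem.Int.mod card_A 13
      precedesWhile 13 column card_B' card_C m) 0

-- ===== PORT B =====
-- modular inverses of the step sizes mod 13 (13 is prime)
def precedesInv : List (Int × Int) := [(1, 1), (2, 7), (3, 9), (4, 10)]

def precedes_alt (card_A : Int) (card_B : Int) : Int :=
  let a := PySem.Int.mod card_A 13
  let b := PySem.Int.mod card_B 13
  if a = 0 then 0
  else
    precedesInv.foldl
      (fun count si =>
        let kb0 := PySem.Int.mod ((b - a) * si.2) 13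
        let k_b := if kb0 = 0 then 13 else kb0   -- 'or 13': 0 steps means a full cycle
        let k_0 := PySem.Int.mod ((-a) * si.2) 13
        if k_b ≤ k_0 then count + 1 else count) 0

-- ===== PRECONDITION & SPEC =====
def Spec_precedes (card_A : Int) (card_B : Int) (out : Int) : Prop := out = precedes_alt card_A card_B
instance (card_A : Int) (card_B : Int) (out : Int) : Decidable (Spec_precedes card_A card_B out) := by unfold Spec_precedes; infer_instance

-- ===== CLAIM (what is proved, stated in full; the proofs are below) =====
def Claim_equal_precedes : Prop := ∀ (card_A : Int) (card_B : Int), Dom_precedes card_A card_B → Spec_precedes card_A card_B (precedes card_A card_B)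

-- ===== LEMMAS AND PROOFS =====
lemma precedes_mod (x y : Int) :
    precedes x y = precedes (PySem.Int.mod x 13) (PySem.Int.mod y 13) := by
  simp [precedes]

lemma precedes_alt_mod (x y : Int) :
    precedes_alt x y = precedes_alt (PySem.Int.mod x 13) (PySem.Int.mod y 13) := by
  simp [precedes_alt]

lemma precedes_core (a b : Int) (h1 : 0 ≤ a) (h2 : a < 13) (h3 : 0 ≤ b) (h4 : b < 13) :
    precedes a b = precedes_alt a b := by
  interval_cases a <;> interval_cases b <;> decide

-- ===== VERDICT (by name: the statement is the Claim_ definition above) =====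
theorem precedes_spec : Claim_equal_precedes := by
  intro x y _
  unfold Spec_precedes
  rw [precedes_mod, precedes_alt_mod]
  exact precedes_core _ _ (PySem.Int.mod_nonneg _ (by norm_num))
    (PySem.Int.mod_lt _ (by norm_num))
    (PySem.Int.mod_nonneg _ (by norm_num))
    (PySem.Int.mod_lt _ (by norm_num))
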